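-- pv_equiv track=rewrite | github.com/Ashiq-am/Data-Structures-Algorithm | 1.Python Algorithms/8.Bitwise Algorithms/2.Intermediate/31.Pairs of complete strings in two sets of strings/Example 2.py | countCompletePairs
-- ===== SOURCE A (Python) =====
-- def countCompletePairs(set1, set2, n, m):
--     result = 0
--
--     # con_s1[i] is going to store an integer whose
--     # set bits represent presence/absence of characters
--     # in set1[i].
--     # Similarly con_s2[i] is going to store an integer
--     # whose set bits represent presence/absence of
--     # characters in set2[i]
--     con_s1, con_s2 = [0] * n, [0] * m
--
--     # Process all strings in set1[]
--     for i in range(n):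
--
--         # initializing all bits to 0
--         con_s1[i] = 0
--         for j in range(len(set1[i])):
--             # Setting the ascii code of char s[i][j]
--             # to 1 in the compressed integer.
--             con_s1[i] = con_s1[i] | (1 << (ord(set1[i][j]) - ord('a')))
--
--     # Process all strings in set2[]
--     for i in range(m):
--
--         # initializing all bits to 0
--         con_s2[i] = 0
--         for j in range(len(set2[i])):
--             # setting the ascii code of char s[i][j]
--             # to 1 in the compressed integer.
--             con_s2[i] = con_s2[i] | (1 << (ord(set2[i][j]) - ord('a')))
--
--     # assigning a variable whose all 26 (0..25)
--     # bits are set to 1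
--     complete = (1 << 26) - 1
--
--     # Now consider every pair of integer in con_s1[]
--     # and con_s2[] and check if the pair is complete.
--     for i in range(n):
--         for j in range(m):
--
--             # if all bits are set, the strings are
--             # complete!
--             if ((con_s1[i] | con_s2[j]) == complete):
--                 result += 1
--
--     return result
-- ===== SOURCE B (Python) =====
-- def countCompletePairs(set1, set2, n, m):
--     complete = (1 << 26) - 1
--
--     def mask(s):
--         v = 0
--         for ch in s:
--             v |= 1 << (ord(ch) - ord('a'))
--         return v
--
--     # Group the first m strings of set2 by their character mask.
--     counts = {}
--     for s in set2[:max(m, 0)]: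
--         k = mask(s)
--         counts[k] = counts.get(k, 0) + 1
--
--     # For each string of set1, add the counts of all distinct set2 masks
--     # that complete it, instead of enumerating every pair.
--     total = 0
--     for s in set1[:max(n, 0)]:
--         m1 = mask(s)
--         for m2, c in counts.items():
--             if (m1 | m2) == complete:
--                 total += c
--     return total
-- ===== Notes on version B (the rewrite author's own statement) =====
-- stated objective: faster
-- what changed: Replaces the per-pair double enumeration over all n*m index pairs with a dict that groups the set2 strings by mask once, then adds count-weighted contributions per distinct set2 mask for each set1 string.
import Mathlib
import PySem

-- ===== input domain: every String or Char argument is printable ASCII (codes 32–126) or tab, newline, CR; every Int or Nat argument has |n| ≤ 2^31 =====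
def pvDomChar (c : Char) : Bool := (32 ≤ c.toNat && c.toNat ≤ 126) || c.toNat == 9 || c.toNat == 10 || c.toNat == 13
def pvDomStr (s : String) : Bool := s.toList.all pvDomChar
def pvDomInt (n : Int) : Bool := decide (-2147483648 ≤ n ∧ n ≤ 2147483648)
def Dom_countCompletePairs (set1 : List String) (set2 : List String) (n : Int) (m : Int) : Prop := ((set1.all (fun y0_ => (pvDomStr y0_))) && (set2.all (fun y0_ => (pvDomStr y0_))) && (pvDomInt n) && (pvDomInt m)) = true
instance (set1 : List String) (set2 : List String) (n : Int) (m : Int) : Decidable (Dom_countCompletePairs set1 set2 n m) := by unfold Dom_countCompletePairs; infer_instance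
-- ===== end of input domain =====

-- B replaces A's per-pair double loop by a mask-count dict over set2; alternative algorithm, same results.

-- ===== PORT A =====
-- A's inner char loop 'for j in range(len(s)): v |= 1 << (ord(s[j]) - 97)' as a fold over the chars
-- (exact under Pre_, where every used char code is ≥ 97 so Nat subtraction equals Python's).
def pvMask (s : String) : Nat :=
  s.toList.foldl (fun v c => v ||| (1 <<< (c.toNat - 97))) 0

-- 'for i in range(n): … set1[i] …' reads exactly the first n elements; under Pre_ (n ≤ len set1,
-- m ≤ len set2) this is List.take n.toNat (negative n gives the empty list, as in Python).
def countCompletePairs (set1 : List String) (set2 : List String) (n : Int) (m : Int) : Int :=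
  let con_s1 := (set1.take n.toNat).map pvMask
  let con_s2 := (set2.take m.toNat).map pvMask
  let complete := (1 <<< 26) - 1
  con_s1.foldl (fun r a => con_s2.foldl (fun r b => if a ||| b == complete then r + 1 else r) r) (0 : Int)

-- ===== PORT B =====
def countCompletePairs_alt (set1 : List String) (set2 : List String) (n : Int) (m : Int) : Int :=
  let complete := (1 <<< 26) - 1
  let counts := ((set2.take (max m 0).toNat).map pvMask).foldl
    (fun d k => d.insert k (d.getD k 0 + 1)) (PySem.Dict.empty : PySem.Dict Nat Int)
  (set1.take (max n 0).toNat).foldl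
    (fun total s =>
      let m1 := pvMask s
      counts.items.foldl (fun t kc => if m1 ||| kc.1 == complete then t + kc.2 else t) total)
    (0 : Int)

-- ===== PRECONDITION & SPEC =====
-- Pre_ = exactly where Python A returns: n/m within the list lengths (else IndexError) and every
-- character of the strings A reads has code ≥ 'a' (else 1 << negative raises ValueError).
def Pre_countCompletePairs (set1 : List String) (set2 : List String) (n : Int) (m : Int) : Prop :=
  n ≤ (set1.length : Int) ∧ m ≤ (set2.length : Int) ∧
  ((set1.take n.toNat).all (fun s => s.toList.all (fun c => 97 ≤ c.toNat)) = true) ∧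
  ((set2.take m.toNat).all (fun s => s.toList.all (fun c => 97 ≤ c.toNat)) = true)
instance (set1 : List String) (set2 : List String) (n : Int) (m : Int) : Decidable (Pre_countCompletePairs set1 set2 n m) := by unfold Pre_countCompletePairs; infer_instance

def pvWitness_countCompletePairs : List String × List String × Int × Int :=
  (["abcdefghijklm", "qrs"], ["nopqrstuvwxyz", "abc"], 2, 2)

def Spec_countCompletePairs (set1 : List String) (set2 : List String) (n : Int) (m : Int) (out : Int) : Prop := out = countCompletePairs_alt set1 set2 n m
instance (set1 : List String) (set2 : List String) (n : Int) (m : Int) (out : Int) : Decidable (Spec_countCompletePairs set1 set2 n m out) := by unfold Spec_countCompletePairs; infer_instance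

-- ===== CLAIM (what is proved, stated in full; the proofs are below) =====
def Claim_equal_countCompletePairs : Prop := ∀ (set1 : List String) (set2 : List String) (n : Int) (m : Int), Dom_countCompletePairs set1 set2 n m → Pre_countCompletePairs set1 set2 n m → Spec_countCompletePairs set1 set2 n m (countCompletePairs set1 set2 n m)

-- ===== LEMMAS AND PROOFS =====

-- counting fold = accumulator + countP
theorem pv_foldl_count (p : Nat → Bool) (l : List Nat) (r : Int) :
    l.foldl (fun r b => if p b then r + 1 else r) r = r + (l.countP p : Int) := by
  induction l generalizing r with
  | nil => simp
  | cons x xs ih =>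
    simp only [List.foldl_cons, List.countP_cons, ih]
    by_cases h : p x = true <;> simp [h] <;> try ring

-- items fold = accumulator + sum of selected values
theorem pv_foldl_items (p : Nat → Bool) (l : List (Nat × Int)) (t : Int) :
    l.foldl (fun t kc => if p kc.1 then t + kc.2 else t) t
      = t + ((l.map (fun kc => if p kc.1 then kc.2 else 0)).sum) := by
  induction l generalizing t with
  | nil => simp
  | cons x xs ih =>
    simp only [List.foldl_cons, List.map_cons, List.sum_cons, ih]
    by_cases h : p x.1 = true <;> simp [h] <;> try ring

-- sum over the distinct masks, weighted by multiplicity, = plain countP over the list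
theorem pv_sum_dedup_count (p : Nat → Bool) (S xs : List Nat)
    (hnd : S.Nodup) (hmem : ∀ k, k ∈ S ↔ k ∈ xs) :
    (S.map (fun k => if p k then (xs.count k : Int) else 0)).sum = (xs.countP p : Int) := by
  have hS : S.toFinset = xs.toFinset := by
    ext k; simp [hmem k]
  have h1 : (S.map (fun k => if p k then (xs.count k : Int) else 0)).sum
      = ∑ k ∈ S.toFinset, (if p k then (xs.count k : Int) else 0) := by
    rw [List.sum_toFinset _ hnd]
  rw [h1, hS]
  have h2 : ∑ k ∈ xs.toFinset, (if p k then (xs.count k : Int) else 0)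
      = ∑ k ∈ xs.toFinset.filter (fun k => p k), (xs.count k : Int) := by
    rw [Finset.sum_filter]
  rw [h2]
  have h3 : xs.toFinset.filter (fun k => p k) = (xs.filter p).toFinset := by
    ext k; simp
  rw [h3]
  have h4 : ∀ k ∈ (xs.filter p).toFinset, (xs.count k : Int) = ((xs.filter p).count k : Int) := by
    intro k hk
    simp only [List.mem_toFinset, List.mem_filter] at hk
    rw [List.count_filter]
    simp [hk.2]
  rw [Finset.sum_congr rfl h4]
  have h5 : ∑ k ∈ (xs.filter p).toFinset, (xs.filter p).count k = (xs.filter p).length :=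
    List.sum_toFinset_count_eq_length (xs.filter p)
  have : (∑ k ∈ (xs.filter p).toFinset, ((xs.filter p).count k : Int))
      = (((xs.filter p).length : Nat) : Int) := by
    rw [← h5]; push_cast; rfl
  rw [this, List.countP_eq_length_filter]

-- the inner loop of B over the counter's items counts exactly like A's inner loop over the raw list
theorem pv_inner (p : Nat → Bool) (xs : List Nat) (t : Int) :
    ((xs.foldl (fun d k => d.insert k (d.getD k 0 + 1)) (PySem.Dict.empty : PySem.Dict Nat Int)).items).foldl
        (fun t kc => if p kc.1 then t + kc.2 else t) t
      = t + (xs.countP p : Int) := by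
  rw [PySem.Dict.foldl_insert_getD_add_one_eq_counter, PySem.Dict.items_counter]
  rw [pv_foldl_items, List.map_map]
  have : ((fun kc => if p kc.1 = true then kc.2 else (0:Int)) ∘ fun k => (k, (xs.count k : Int)))
      = fun k => if p k then (xs.count k : Int) else 0 := by
    funext k; rfl
  rw [this, pv_sum_dedup_count p _ xs (PySem.Set.nodup_ofList xs)
      (fun k => PySem.Set.mem_ofList xs k)]

-- both outer loops accumulate, per set1 string, the same per-string count
theorem pv_outer (l1 : List String) (xs : List Nat) (C : Nat) (r : Int) :
    (l1.map pvMask).foldl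
        (fun r a => xs.foldl (fun r b => if a ||| b == C then r + 1 else r) r) r
      = l1.foldl
        (fun total s =>
          let m1 := pvMask s
          ((xs.foldl (fun d k => d.insert k (d.getD k 0 + 1)) (PySem.Dict.empty : PySem.Dict Nat Int)).items).foldl
            (fun t kc => if m1 ||| kc.1 == C then t + kc.2 else t) total) r := by
  induction l1 generalizing r with
  | nil => simp
  | cons s l1 ih =>
    simp only [List.map_cons, List.foldl_cons]
    rw [pv_foldl_count (fun b => pvMask s ||| b == C) xs r,
        pv_inner (fun b => pvMask s ||| b == C) xs r]
    exact ih _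

theorem pv_main (set1 set2 : List String) (n m : Int) :
    countCompletePairs set1 set2 n m = countCompletePairs_alt set1 set2 n m := by
  unfold countCompletePairs countCompletePairs_alt
  have hmax : ∀ k : Int, (max k 0).toNat = k.toNat := by intro k; omega
  rw [hmax n, hmax m]
  exact pv_outer (set1.take n.toNat) ((set2.take m.toNat).map pvMask) ((1 <<< 26) - 1) 0

-- ===== VERDICT (by name: the statement is the Claim_ definition above) =====
theorem countCompletePairs_spec : Claim_equal_countCompletePairs := by
  intro set1 set2 n m _ _
  unfold Spec_countCompletePairs
  exact pv_main set1 set2 n m
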